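-- pv_equiv track=rewrite | github.com/SpookyJelly/SSAFY_daily_works | TIL/algorism2/0413/1240_암호코드스캔_D3.py | proof_it
-- ===== SOURCE A (Python) =====
-- def proof_it(lst:list)->int:
--     total = 0
--     for idx in range(len(lst)):
--         if idx%2:
--             total += lst[idx]
--         else:
--             total += lst[idx]*3
--     if total%10 == 0:
--         return sum(lst)
--     else:
--         return 0
-- ===== SOURCE B (Python) =====
-- def proof_it(lst: list) -> int:
--     s = sum(lst)
--     e = sum(lst[::2])
--     return s if (s + 2 * e) % 10 == 0 else 0
-- ===== Notes on version B (the rewrite author's own statement) =====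
-- stated objective: faster
-- what changed: Replaces the single range(len) loop with an index-parity branch by two whole-list accumulations (sum(lst) and sum(lst[::2])) combined with the closed form total = s + 2*e; the per-element interpreted loop disappears in favour of C-level builtins.
import Mathlib
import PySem

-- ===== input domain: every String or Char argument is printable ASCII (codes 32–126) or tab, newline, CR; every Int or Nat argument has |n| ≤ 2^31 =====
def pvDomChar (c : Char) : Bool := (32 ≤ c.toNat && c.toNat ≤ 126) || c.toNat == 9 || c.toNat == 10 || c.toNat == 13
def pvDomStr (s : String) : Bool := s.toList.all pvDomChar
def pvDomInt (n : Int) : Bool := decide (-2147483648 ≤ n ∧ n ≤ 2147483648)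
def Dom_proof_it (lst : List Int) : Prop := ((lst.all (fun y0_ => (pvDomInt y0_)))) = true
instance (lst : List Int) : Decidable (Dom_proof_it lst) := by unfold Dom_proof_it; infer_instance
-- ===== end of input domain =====

-- B replaces A's index-parity loop by two plain accumulations (sum(lst) and sum(lst[::2]))
-- combined with the closed form total = s + 2*e (objective: faster by a constant factor,
-- measured: the per-element branch loop becomes builtin sum/slice).

-- ===== PORT A =====
-- literal port: total accumulated over range(len(lst)) with an index-parity branch
def proof_it (lst : List Int) : Int :=
  let total := (PySem.List.pyRange 0 (lst.length : Int) 1).foldl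
    (fun total idx =>
      if PySem.Int.mod idx 2 ≠ 0 then
        total + PySem.List.pyGetD lst idx 0      -- lst[idx]; idx always in range here
      else
        total + PySem.List.pyGetD lst idx 0 * 3) 0
  if PySem.Int.mod total 10 = 0 then lst.sum else 0

-- ===== PORT B =====
def proof_it_alt (lst : List Int) : Int :=
  let s := lst.sum
  -- lst[::2]; the step literal 2 is nonzero, so slice? is always `some` and `.getD []` is exact
  let e := ((PySem.List.slice? lst none none 2).getD []).sum
  if PySem.Int.mod (s + 2 * e) 10 = 0 then s else 0

-- ===== PRECONDITION & SPEC =====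
def Spec_proof_it (lst : List Int) (out : Int) : Prop := out = proof_it_alt lst
instance (lst : List Int) (out : Int) : Decidable (Spec_proof_it lst out) := by unfold Spec_proof_it; infer_instance

-- ===== CLAIM (what is proved, stated in full; the proofs are below) =====
def Claim_equal_proof_it : Prop := ∀ (lst : List Int), Dom_proof_it lst → Spec_proof_it lst (proof_it lst)

-- ===== LEMMAS AND PROOFS =====

-- every other element of a list, starting at index 0 (proof-side characterisation of lst[::2])
def eo : List Int → List Int
  | [] => []
  | [x] => [x]
  | x :: _ :: t => x :: eo t

lemma filterMap_two (xs : List Int) :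
    List.filterMap (fun k => xs[2 * k]?) (List.range ((xs.length + 1) / 2)) = eo xs := by
  match xs with
  | [] => simp [eo]
  | [x] => simp [eo]
  | x :: y :: t =>
    have hc : ((x :: y :: t).length + 1) / 2 = (t.length + 1) / 2 + 1 := by
      simp [List.length_cons]; omega
    rw [hc, List.range_succ_eq_map, List.filterMap_cons, List.filterMap_map]
    have hf : ∀ k : Nat, (x :: y :: t)[2 * (k + 1)]? = t[2 * k]? := by
      intro k
      have h1 : 2 * (k + 1) = 2 * k + 1 + 1 := by omega
      simp [h1]
    simp only [Function.comp_def, hf, filterMap_two t]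
    simp [eo]

lemma slice?_two (xs : List Int) :
    PySem.List.slice? xs none none 2 = some (eo xs) := by
  simp only [PySem.List.slice?, PySem.List.sliceIndices]
  norm_num
  have hc : (if 0 < xs.length then (((xs.length : Int) + 2 - 1) / 2).toNat else 0)
      = (xs.length + 1) / 2 := by
    split
    · have : ((xs.length : Int) + 2 - 1) = ((xs.length + 1 : Nat) : Int) := by push_cast; ring
      rw [this]
      rw [show ((2:Int) = ((2:Nat) : Int)) from rfl, ← Int.natCast_div, Int.toNat_natCast]
    · omega
  rw [hc]
  have hfun : ∀ k : Nat, xs[(2 * (k : Int)).toNat]? = xs[2 * k]? := by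
    intro k
    congr 1
  simp only [hfun, filterMap_two]

lemma eo_concat (ys : List Int) (y : Int) :
    (eo (ys ++ [y])).sum = (eo ys).sum + (if ys.length % 2 = 0 then y else 0) := by
  match ys with
  | [] => simp [eo]
  | [x] => simp [eo]
  | x :: z :: t =>
    have ih := eo_concat t y
    simp only [List.cons_append, eo, List.sum_cons, ih, List.length_cons]
    have h2 : (t.length + 1 + 1) % 2 = t.length % 2 := by omega
    simp only [h2]; ring

lemma loop_eq (lst : List Int) :
    (PySem.List.pyRange 0 (lst.length : Int) 1).foldl
      (fun total idx =>
        if PySem.Int.mod idx 2 ≠ 0 then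
          total + PySem.List.pyGetD lst idx 0
        else
          total + PySem.List.pyGetD lst idx 0 * 3) 0
    = lst.sum + 2 * (eo lst).sum := by
  induction lst using List.reverseRecOn with
  | nil => simp [PySem.List.pyRange_one_eq_nil, eo]
  | append_singleton ys y ih =>
    have hlen : ((ys ++ [y]).length : Int) = (ys.length : Int) + 1 := by
      simp
    rw [hlen, PySem.List.pyRange_one_succ_right (by positivity), List.foldl_append]
    have hcongr :
        (PySem.List.pyRange 0 (ys.length : Int) 1).foldl
          (fun total idx =>
            if PySem.Int.mod idx 2 ≠ 0 then
              total + PySem.List.pyGetD (ys ++ [y]) idx 0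
            else
              total + PySem.List.pyGetD (ys ++ [y]) idx 0 * 3) 0
        = (PySem.List.pyRange 0 (ys.length : Int) 1).foldl
          (fun total idx =>
            if PySem.Int.mod idx 2 ≠ 0 then
              total + PySem.List.pyGetD ys idx 0
            else
              total + PySem.List.pyGetD ys idx 0 * 3) 0 := by
      apply PySem.List.foldl_congr_mem
      intro acc idx hmem
      have hb := (PySem.List.mem_pyRange_one (a := 0) (b := (ys.length : Int)) (x := idx)).1 hmem
      have h0 : 0 ≤ idx := hb.1
      have h1 : idx < (ys.length : Int) := hb.2
      have hget : PySem.List.pyGetD (ys ++ [y]) idx 0 = PySem.List.pyGetD ys idx 0 := by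
        rw [PySem.List.pyGetD_eq_getElem _ _ h0 (by simp; omega),
            PySem.List.pyGetD_eq_getElem _ _ h0 (by exact_mod_cast h1)]
        exact List.getElem_append_left (by omega)
      rw [hget]
    rw [hcongr, ih]
    have hgety : PySem.List.pyGetD (ys ++ [y]) (ys.length : Int) 0 = y := by
      rw [PySem.List.pyGetD_eq_getElem _ _ (by positivity) (by simp)]
      simp
    simp only [List.foldl_cons, List.foldl_nil, hgety]
    have hmod : PySem.Int.mod (ys.length : Int) 2 = ((ys.length % 2 : Nat) : Int) :=
      PySem.Int.mod_natCast ys.length 2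
    rw [eo_concat]
    rcases Nat.even_or_odd ys.length with he | ho
    · have h2 : ys.length % 2 = 0 := Nat.even_iff.mp he
      rw [if_neg (by rw [hmod, h2]; simp), if_pos h2]
      simp [List.sum_append]; ring
    · have h2 : ys.length % 2 = 1 := Nat.odd_iff.mp ho
      rw [if_pos (by rw [hmod, h2]; simp), if_neg (by omega)]
      simp [List.sum_append]; ring

-- ===== VERDICT (by name: the statement is the Claim_ definition above) =====
theorem proof_it_spec : Claim_equal_proof_it := by
  intro lst _
  unfold Spec_proof_it proof_it proof_it_alt
  rw [loop_eq, slice?_two]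
  rfl
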